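-- pv_equiv track=rewrite | github.com/AustinAdodo/Weighted_Uniform_Strings | main.py | two_d_arr_sort
-- ===== SOURCE A (Python) =====
-- def two_d_arr_sort(a):
--     answer = []
--     ans1 = []
--     sorted_list = [[]]
--     sorted_list = sorted(a, key=lambda x: x[1])
--     ans1 = (item[1] for item in sorted_list)
--     sorted_list2 = list(set(ans1))
--     sorted_list2.sort()
--     sorted_list = list(filter(lambda x: x[1] == sorted_list2[1], sorted_list))
--     result = sorted(sorted_list, key=lambda x: x[0])
--     for item in result:
--         answer.append(item[0])
--     return answer
-- ===== SOURCE B (Python) =====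
-- def two_d_arr_sort(a):
--     # One pass tracking the smallest (lo) and second-smallest (hi) DISTINCT
--     # second-values, then one filter + sort of the first elements.
--     lo = hi = None
--     for row in a:
--         v = row[1]
--         if lo is None:
--             lo = v
--         elif v < lo:
--             hi = lo
--             lo = v
--         elif lo < v and (hi is None or v < hi):
--             hi = v
--     return sorted(row[0] for row in a if row[1] == hi)
-- ===== Notes on version B (the rewrite author's own statement) =====
-- stated objective: alternative
-- what changed: Replaces A's sort-whole-array-by-second-value + set-build-and-sort-and-index selection with a single O(n) scan maintaining the smallest and second-smallest distinct second-values, then one filter and one sort of the first elements.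
import Mathlib
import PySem

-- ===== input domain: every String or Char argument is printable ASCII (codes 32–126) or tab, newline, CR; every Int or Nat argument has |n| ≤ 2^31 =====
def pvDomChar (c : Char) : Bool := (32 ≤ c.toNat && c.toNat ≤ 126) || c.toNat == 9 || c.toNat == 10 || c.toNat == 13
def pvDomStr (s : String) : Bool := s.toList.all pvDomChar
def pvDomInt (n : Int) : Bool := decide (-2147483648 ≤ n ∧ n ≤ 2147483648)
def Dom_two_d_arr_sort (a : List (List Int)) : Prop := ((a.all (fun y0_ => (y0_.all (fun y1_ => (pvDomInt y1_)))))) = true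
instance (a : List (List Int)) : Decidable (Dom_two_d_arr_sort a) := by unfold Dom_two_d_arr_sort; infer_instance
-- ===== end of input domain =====

-- B replaces A's sort-by-second-value + set-build-and-sort-and-index selection by a single scan
-- that maintains the smallest and second-smallest distinct second-values (objective: alternative).

-- ===== PORT A =====
-- x[1] / x[0] are ported as pyGetD with default 0; Pre_ guarantees every row has length ≥ 2,
-- so the default is never used on admitted inputs.
def pvKey1 (x : List Int) : Int := PySem.List.pyGetD x 1 0
def pvKey0 (x : List Int) : Int := PySem.List.pyGetD x 0 0

def two_d_arr_sort (a : List (List Int)) : List Int :=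
  let sorted_list := PySem.List.sorted a pvKey1 false
  let ans1 := sorted_list.map pvKey1
  let sorted_list2 := PySem.List.sorted (PySem.Set.ofList ans1) (fun x => x) false
  let second := PySem.List.pyGetD sorted_list2 1 0   -- sorted_list2[1]; in range under Pre_
  let filtered := sorted_list.filter (fun x => pvKey1 x == second)
  let result := PySem.List.sorted filtered pvKey0 false
  result.map pvKey0

-- ===== PORT B =====
def pvScanStep (st : Option Int × Option Int) (row : List Int) : Option Int × Option Int :=
  let v := pvKey1 row
  match st with
  | (none, hi) => (some v, hi)
  | (some lo, hi) =>
    if v < lo then (some v, some lo)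
    else
      match hi with
      | none => if lo < v then (some lo, some v) else (some lo, none)
      | some h => if lo < v ∧ v < h then (some lo, some v) else (some lo, some h)

def two_d_arr_sort_alt (a : List (List Int)) : List Int :=
  let st := a.foldl pvScanStep (none, none)
  match st.2 with
  | none => []   -- Python B: 'row[1] == None' is False for every int, so the comprehension is empty
  | some h =>
    PySem.List.sorted ((a.filter (fun row => pvKey1 row == h)).map pvKey0) (fun x => x) false

-- ===== PRECONDITION & SPEC =====
-- Pre_ excludes exactly the inputs on which Python A raises IndexError: a row shorter than 2
-- (x[1] fails) or fewer than two distinct second-values (sorted_list2[1] fails).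
def Pre_two_d_arr_sort (a : List (List Int)) : Prop :=
  (∀ r ∈ a, 2 ≤ r.length) ∧ ∃ r ∈ a, ∃ s ∈ a, pvKey1 r ≠ pvKey1 s
instance (a : List (List Int)) : Decidable (Pre_two_d_arr_sort a) := by
  unfold Pre_two_d_arr_sort; infer_instance

def pvWitness_two_d_arr_sort : List (List Int) := [[3, 4], [1, 2], [5, 4]]

def Spec_two_d_arr_sort (a : List (List Int)) (out : List Int) : Prop := out = two_d_arr_sort_alt a
instance (a : List (List Int)) (out : List Int) : Decidable (Spec_two_d_arr_sort a out) := by unfold Spec_two_d_arr_sort; infer_instance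

-- ===== CLAIM (what is proved, stated in full; the proofs are below) =====
def Claim_equal_two_d_arr_sort : Prop := ∀ (a : List (List Int)), Dom_two_d_arr_sort a → Pre_two_d_arr_sort a → Spec_two_d_arr_sort a (two_d_arr_sort a)

-- ===== LEMMAS AND PROOFS =====

-- Invariant of B's scan: after consuming the rows c, the state is exactly
-- (smallest distinct second-value, second-smallest distinct second-value) of c.
def pvInv (c : List (List Int)) : Option Int × Option Int → Prop
  | (none, none) => c = []
  | (some m, none) => m ∈ c.map pvKey1 ∧ ∀ y ∈ c.map pvKey1, y = m
  | (some m, some h) => m ∈ c.map pvKey1 ∧ h ∈ c.map pvKey1 ∧ m < h ∧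
      (∀ y ∈ c.map pvKey1, m ≤ y) ∧ (∀ y ∈ c.map pvKey1, y = m ∨ h ≤ y)
  | (none, some _) => False

lemma pvInv_step (c : List (List Int)) (st : Option Int × Option Int) (row : List Int)
    (h : pvInv c st) : pvInv (c ++ [row]) (pvScanStep st row) := by
  rcases st with ⟨lo, hi⟩
  rcases lo with _ | lo
  · rcases hi with _ | h'
    · -- state (none, none): h : c = []
      simp only [pvInv] at h
      subst h
      simp [pvScanStep, pvInv]
    · exact absurd h (by simp [pvInv])
  · rcases hi with _ | h'
    · -- state (some lo, none)
      obtain ⟨hm, hall⟩ : lo ∈ c.map pvKey1 ∧ ∀ y ∈ c.map pvKey1, y = lo := h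
      by_cases h1 : pvKey1 row < lo
      · simp only [pvScanStep, if_pos h1]
        refine ⟨by simp, by simp [hm], h1, ?_, ?_⟩
        · intro y hy
          simp only [List.map_append, List.map_cons, List.map_nil, List.mem_append,
            List.mem_singleton] at hy
          rcases hy with hy | hy
          · have := hall y hy; omega
          · omega
        · intro y hy
          simp only [List.map_append, List.map_cons, List.map_nil, List.mem_append,
            List.mem_singleton] at hy
          rcases hy with hy | hy
          · have := hall y hy; omega
          · omega
      · by_cases h2 : lo < pvKey1 row
        · simp only [pvScanStep, if_neg h1, if_pos h2]
          refine ⟨by simp [hm], by simp, h2, ?_, ?_⟩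
          · intro y hy
            simp only [List.map_append, List.map_cons, List.map_nil, List.mem_append,
              List.mem_singleton] at hy
            rcases hy with hy | hy
            · have := hall y hy; omega
            · omega
          · intro y hy
            simp only [List.map_append, List.map_cons, List.map_nil, List.mem_append,
              List.mem_singleton] at hy
            rcases hy with hy | hy
            · exact Or.inl (hall y hy)
            · omega
        · simp only [pvScanStep, if_neg h1, if_neg h2]
          refine ⟨by simp [hm], ?_⟩
          intro y hy
          simp only [List.map_append, List.map_cons, List.map_nil, List.mem_append,
            List.mem_singleton] at hy
          rcases hy with hy | hy
          · exact hall y hy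
          · omega
    · -- state (some lo, some h')
      obtain ⟨hm, hh, hlt, hlow, hsec⟩ : lo ∈ c.map pvKey1 ∧ h' ∈ c.map pvKey1 ∧ lo < h' ∧
          (∀ y ∈ c.map pvKey1, lo ≤ y) ∧ (∀ y ∈ c.map pvKey1, y = lo ∨ h' ≤ y) := h
      by_cases h1 : pvKey1 row < lo
      · simp only [pvScanStep, if_pos h1]
        refine ⟨by simp, by simp [hm], h1, ?_, ?_⟩
        · intro y hy
          simp only [List.map_append, List.map_cons, List.map_nil, List.mem_append,
            List.mem_singleton] at hy
          rcases hy with hy | hy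
          · have := hlow y hy; omega
          · omega
        · intro y hy
          simp only [List.map_append, List.map_cons, List.map_nil, List.mem_append,
            List.mem_singleton] at hy
          rcases hy with hy | hy
          · have := hlow y hy; omega
          · omega
      · by_cases h2 : lo < pvKey1 row ∧ pvKey1 row < h'
        · simp only [pvScanStep, if_neg h1, if_pos h2]
          refine ⟨by simp [hm], by simp, h2.1, ?_, ?_⟩
          · intro y hy
            simp only [List.map_append, List.map_cons, List.map_nil, List.mem_append,
              List.mem_singleton] at hy
            rcases hy with hy | hy
            · exact hlow y hy
            · omega
          · intro y hy
            simp only [List.map_append, List.map_cons, List.map_nil, List.mem_append,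
              List.mem_singleton] at hy
            rcases hy with hy | hy
            · have := hsec y hy; omega
            · omega
        · simp only [pvScanStep, if_neg h1, if_neg h2]
          refine ⟨by simp [hm], by simp [hh], hlt, ?_, ?_⟩
          · intro y hy
            simp only [List.map_append, List.map_cons, List.map_nil, List.mem_append,
              List.mem_singleton] at hy
            rcases hy with hy | hy
            · exact hlow y hy
            · omega
          · intro y hy
            simp only [List.map_append, List.map_cons, List.map_nil, List.mem_append,
              List.mem_singleton] at hy
            rcases hy with hy | hy
            · exact hsec y hy
            · omega

lemma pvInv_foldl (l : List (List Int)) : ∀ (c : List (List Int)) (st : Option Int × Option Int),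
    pvInv c st → pvInv (c ++ l) (l.foldl pvScanStep st) := by
  induction l with
  | nil => intro c st h; simpa using h
  | cons x xs ih =>
    intro c st h
    have := ih (c ++ [x]) (pvScanStep st x) (pvInv_step c st x h)
    simpa using this

lemma pvInv_scan (a : List (List Int)) : pvInv a (a.foldl pvScanStep (none, none)) := by
  have := pvInv_foldl a [] (none, none) rfl
  simpa using this

-- ===== VERDICT (by name: the statement is the Claim_ definition above) =====\n-- A's selected value sorted_list2[1] is the second-smallest distinct second-value; under Pre_
-- B's scan ends in a (some lo, some hi) state with the same hi, and both sides then sort the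
-- same multiset of first elements.
-- A's selected value sorted_list2[1] is the second-smallest distinct second-value; under Pre_
-- B's scan ends in a (some lo, some hi) state with the same hi, and both sides then sort the
-- same multiset of first elements.
theorem two_d_arr_sort_spec : Claim_equal_two_d_arr_sort := by
  intro a _ hpre
  obtain ⟨hlen, r, hr, s, hs, hne⟩ := hpre
  unfold Spec_two_d_arr_sort
  have hperm : (PySem.List.sorted a pvKey1 false).Perm a := PySem.List.sorted_perm a pvKey1 false
  have hmem1 : ∀ y : Int, y ∈ (PySem.List.sorted a pvKey1 false).map pvKey1 ↔ y ∈ a.map pvKey1 :=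
    fun y => (hperm.map pvKey1).mem_iff
  set ans1 := (PySem.List.sorted a pvKey1 false).map pvKey1 with hans1
  set S := PySem.List.sorted (PySem.Set.ofList ans1) (fun x => x) false with hSdef
  have hmemS : ∀ y : Int, y ∈ S ↔ y ∈ a.map pvKey1 := by
    intro y
    rw [hSdef, PySem.List.mem_sorted, PySem.Set.mem_ofList]
    exact hmem1 y
  have hpair : S.Pairwise (· < ·) := PySem.List.sorted_ofList_pairwise_lt ans1
  have hrS : pvKey1 r ∈ S := (hmemS _).2 (List.mem_map_of_mem hr)
  have hsS : pvKey1 s ∈ S := (hmemS _).2 (List.mem_map_of_mem hs)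
  obtain ⟨m, b2, rest, hS⟩ : ∃ m b2 rest, S = m :: b2 :: rest := by
    match S, hrS, hsS with
    | [], hrS, _ => simp at hrS
    | [x], hrS, hsS =>
      simp at hrS hsS
      exact absurd (hrS.trans hsS.symm) hne
    | m :: b2 :: rest, _, _ => exact ⟨m, b2, rest, rfl⟩
  have hmmem : m ∈ a.map pvKey1 := (hmemS m).1 (by rw [hS]; simp)
  have hbmem : b2 ∈ a.map pvKey1 := (hmemS b2).1 (by rw [hS]; simp)
  have hmb : m < b2 := by
    rw [hS] at hpair
    exact (List.pairwise_cons.1 hpair).1 b2 (by simp)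
  have hmin : ∀ y ∈ a.map pvKey1, m ≤ y := by
    intro y hy
    have hyS : y ∈ S := (hmemS y).2 hy
    rw [hS] at hyS hpair
    rcases List.mem_cons.1 hyS with hy1 | hy2
    · omega
    · have := (List.pairwise_cons.1 hpair).1 y hy2; omega
  have hsnd : ∀ y ∈ a.map pvKey1, y = m ∨ b2 ≤ y := by
    intro y hy
    have hyS : y ∈ S := (hmemS y).2 hy
    rw [hS] at hyS hpair
    rcases List.mem_cons.1 hyS with hy1 | hy2
    · omega
    rcases List.mem_cons.1 hy2 with hy3 | hy4
    · omega
    · have := (List.pairwise_cons.1 (List.pairwise_cons.1 hpair).2).1 y hy4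
      right; omega
  -- B's scan ends with second component = some b2
  have hinv := pvInv_scan a
  rcases hstate : a.foldl pvScanStep (none, none) with ⟨lo', hi'⟩
  rw [hstate] at hinv
  rcases lo' with _ | lo'
  · rcases hi' with _ | x
    · simp only [pvInv] at hinv; subst hinv; simp at hr
    · exact absurd hinv (by simp [pvInv])
  rcases hi' with _ | h'
  · obtain ⟨_, hall⟩ : lo' ∈ a.map pvKey1 ∧ ∀ y ∈ a.map pvKey1, y = lo' := hinv
    exact absurd ((hall _ (List.mem_map_of_mem hr)).trans
      (hall _ (List.mem_map_of_mem hs)).symm) hne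
  obtain ⟨hm', hh', hlt', hlow', hsec'⟩ : lo' ∈ a.map pvKey1 ∧ h' ∈ a.map pvKey1 ∧ lo' < h' ∧
      (∀ y ∈ a.map pvKey1, lo' ≤ y) ∧ (∀ y ∈ a.map pvKey1, y = lo' ∨ h' ≤ y) := hinv
  have hlom : lo' = m := by
    have h1 := hmin lo' hm'
    have h2 := hlow' m hmmem
    omega
  have hb : h' = b2 := by
    have h1 : b2 ≤ h' := by
      rcases hsnd h' hh' with he | hge
      · omega
      · exact hge
    have h2 : h' ≤ b2 := by
      rcases hsec' b2 hbmem with he | hge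
      · omega
      · exact hge
    omega
  rw [hb] at hstate
  -- A's selected value sorted_list2[1] equals b2
  have hgetS : PySem.List.pyGetD S 1 0 = b2 := by
    rw [hS]
    simp [PySem.List.pyGetD, PySem.List.pyGet?, PySem.List.pyIdx?]
  have hA : two_d_arr_sort a
      = (PySem.List.sorted ((PySem.List.sorted a pvKey1 false).filter
          (fun x => pvKey1 x == PySem.List.pyGetD S 1 0)) pvKey0 false).map pvKey0 := rfl
  have hB : two_d_arr_sort_alt a
      = PySem.List.sorted ((a.filter (fun row => pvKey1 row == b2)).map pvKey0)
          (fun x => x) false := by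
    unfold two_d_arr_sort_alt
    simp only [hstate]
  rw [hA, hgetS, hB]
  -- both sides: the sorted multiset of first elements of the matching rows
  have hpermF : ((PySem.List.sorted ((PySem.List.sorted a pvKey1 false).filter
        (fun x => pvKey1 x == b2)) pvKey0 false).map pvKey0).Perm
      ((a.filter (fun row => pvKey1 row == b2)).map pvKey0) :=
    ((PySem.List.sorted_perm _ pvKey0 false).trans
      (hperm.filter (fun x => pvKey1 x == b2))).map pvKey0
  have hpwF : ((PySem.List.sorted ((PySem.List.sorted a pvKey1 false).filter
        (fun x => pvKey1 x == b2)) pvKey0 false).map pvKey0).Pairwise (· ≤ ·) :=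
    List.pairwise_map.2 (PySem.List.sorted_pairwise _ pvKey0)
  exact (PySem.List.sorted_id_eq_of_perm_of_pairwise _ _ hpermF hpwF).symm
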